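-- pv_equiv track=rewrite | github.com/YourideBeurs/InfoSec-Assignments | Assignment 2/Knapsack_keyvalidation.py | validatePrivateKey
-- ===== SOURCE A (Python) =====
-- import math
--
-- def is_integer(n):
--     try:
--         float(n)
--     except ValueError:
--         return False
--     else:
--         return float(n).is_integer()
--
-- def convert_to_integer(key):
--     if is_integer(key):
--         return int(key)
--     else:
--         raise ValueError
--
-- def validatePrivateKey(n, m, publicKey, privateKey):
--     # Convert values to integer
--     try:
--         privateKey = [convert_to_integer(x) for x in privateKey]
--         publicKey = [convert_to_integer(x) for x in publicKey]
--     except ValueError: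
--         return False
--
--     # Check if private key is not empty
--     if len(privateKey) == 0:
--         return False
--
--     # Check if the sum of the private key is smaller than
--     if m <= sum(privateKey):
--         return False
--
--     # Check if all values in private key are positive
--     for key in privateKey:
--         if key < 0:
--             return False
--
--     # Check for duplicates in the private key
--     seen = set()
--     for key in privateKey:
--         if key not in seen:
--             seen.add(key)
--         else:
--             return False
--
--     for key in privateKey:
--         if key > m:
--             return False
--
--     # Check if the private key is increasing
--     for i in range(len(privateKey)):
--         if privateKey[i] < sum(privateKey[:i]):
--             return False
--
--     if math.gcd(m, n) > 1:
--         return False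
--
--     return True
-- ===== SOURCE B (Python) =====
-- import math
--
-- def _to_int(x):
--     if not float(x).is_integer():
--         raise ValueError
--     return int(x)
--
-- def validatePrivateKey(n, m, publicKey, privateKey):
--     # One fused pass: a running prefix sum + a seen set replace A's five separate scans.
--     try:
--         privateKey = [_to_int(x) for x in privateKey]
--         publicKey = [_to_int(x) for x in publicKey]
--     except ValueError:
--         return False
--     if not privateKey:
--         return False
--     prefix = 0
--     seen = set()
--     for key in privateKey:
--         if key < 0 or key in seen or key > m or key < prefix:
--             return False
--         seen.add(key)
--         prefix += key
--     return prefix < m and math.gcd(m, n) <= 1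
-- ===== Notes on version B (the rewrite author's own statement) =====
-- stated objective: alternative
-- what changed: Replaces A's five independent full scans of privateKey (sum, negativity, duplicate set-loop, upper bound, O(n^2) prefix-sum loop) by a single fused traversal maintaining a running prefix sum and a seen set, with the sum-vs-m and gcd checks folded into the final return.
import Mathlib
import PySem

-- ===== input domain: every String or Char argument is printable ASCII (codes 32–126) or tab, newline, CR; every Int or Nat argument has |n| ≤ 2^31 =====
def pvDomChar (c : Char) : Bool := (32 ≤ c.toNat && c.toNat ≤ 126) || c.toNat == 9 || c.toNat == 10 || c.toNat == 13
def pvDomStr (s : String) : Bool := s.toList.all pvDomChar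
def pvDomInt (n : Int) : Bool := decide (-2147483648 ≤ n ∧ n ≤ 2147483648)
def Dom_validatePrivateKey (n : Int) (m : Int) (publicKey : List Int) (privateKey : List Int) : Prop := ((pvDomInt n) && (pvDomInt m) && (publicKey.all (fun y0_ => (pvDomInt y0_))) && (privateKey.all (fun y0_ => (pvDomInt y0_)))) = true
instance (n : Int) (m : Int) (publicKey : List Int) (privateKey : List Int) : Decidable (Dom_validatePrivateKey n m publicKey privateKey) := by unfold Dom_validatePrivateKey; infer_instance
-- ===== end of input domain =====

-- B fuses A's five separate scans of privateKey into one pass with a running prefix sum and a seen set (alternative decomposition, same result).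

-- ===== PORT A =====
-- A's duplicate loop: "for key: if key not in seen: seen.add(key) else: return False"
def dupLoopA (seen : PySem.Set Int) : List Int → Bool
  | [] => false
  | key :: rest =>
      if PySem.Set.contains seen key = false then dupLoopA (PySem.Set.add seen key) rest
      else true

-- On Int inputs convert_to_integer(x) never raises and returns x itself (float(x).is_integer() is
-- True and int(x) = x for every int in the domain), so the two conversion comprehensions are
-- identity maps and the except branch is unreachable; each early-`return False` scan is the
-- obvious any-fold; priv[i] is PySem.List.pyGet?, priv[:i] is PySem.List.slice; math.gcd is Int.gcd.
def validatePrivateKey (n : Int) (m : Int) (publicKey : List Int) (privateKey : List Int) : Bool :=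
  let privateKey := privateKey.map (fun x => x)
  let _publicKey := publicKey.map (fun x => x)
  if privateKey.length == 0 then false
  else if m ≤ privateKey.sum then false
  else if privateKey.any (fun key => decide (key < 0)) then false
  else if dupLoopA PySem.Set.empty privateKey then false
  else if privateKey.any (fun key => decide (m < key)) then false
  else if (List.range privateKey.length).any (fun i =>
            match PySem.List.pyGet? privateKey (i : Int) with
            | some v => decide (v < (PySem.List.slice privateKey none (some (i : Int))).sum)
            | none => false) then false
  else if 1 < (Int.gcd m n : Int) then false
  else true

-- ===== PORT B =====
-- B's single fused loop: early-exit on any failed check, else carry (prefix, seen) forward.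
def bLoop (m : Int) (pfx : Int) (seen : PySem.Set Int) : List Int → Option Int
  | [] => some pfx
  | key :: rest =>
      if key < 0 || PySem.Set.contains seen key || m < key || key < pfx then none
      else bLoop m (pfx + key) (PySem.Set.add seen key) rest

def validatePrivateKey_alt (n : Int) (m : Int) (publicKey : List Int) (privateKey : List Int) : Bool :=
  let privateKey := privateKey.map (fun x => x)
  let _publicKey := publicKey.map (fun x => x)
  if privateKey.isEmpty then false
  else
    match bLoop m 0 PySem.Set.empty privateKey with
    | none => false
    | some pfx => decide (pfx < m) && decide ((Int.gcd m n : Int) ≤ 1)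

-- ===== PRECONDITION & SPEC =====
def Spec_validatePrivateKey (n : Int) (m : Int) (publicKey : List Int) (privateKey : List Int) (out : Bool) : Prop := out = validatePrivateKey_alt n m publicKey privateKey
instance (n : Int) (m : Int) (publicKey : List Int) (privateKey : List Int) (out : Bool) : Decidable (Spec_validatePrivateKey n m publicKey privateKey out) := by unfold Spec_validatePrivateKey; infer_instance

-- ===== CLAIM (what is proved, stated in full; the proofs are below) =====
def Claim_equal_validatePrivateKey : Prop := ∀ (n : Int) (m : Int) (publicKey : List Int) (privateKey : List Int), Dom_validatePrivateKey n m publicKey privateKey → Spec_validatePrivateKey n m publicKey privateKey (validatePrivateKey n m publicKey privateKey)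

-- ===== LEMMAS AND PROOFS =====

-- A's increasing-check with an explicit accumulated prefix sum (proofs only).
def incrG (c : Int) : List Int → Bool
  | [] => false
  | k :: rest => decide (k < c) || incrG (c + k) rest

theorem incrG_eq (l : List Int) : ∀ (c : Int), incrG c l =
    (List.range l.length).any (fun i =>
      match l[i]? with
      | some v => decide (v < c + (l.take i).sum)
      | none => false) := by
  induction l with
  | nil => intro c; simp [incrG]
  | cons k rest ih =>
    intro c
    simp only [incrG, List.length_cons, List.range_succ_eq_map, List.any_cons, List.any_map,
      Function.comp_def, List.getElem?_cons_succ, List.getElem?_cons_zero, List.take_succ_cons,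
      List.take_zero, List.sum_cons, List.sum_nil, ih (c + k)]
    simp only [Int.add_assoc, Int.add_zero]
    rfl

theorem bLoop_eq (m : Int) (l : List Int) : ∀ (c : Int) (s : PySem.Set Int),
    bLoop m c s l =
      if l.any (fun k => decide (k < 0)) || dupLoopA s l || l.any (fun k => decide (m < k)) || incrG c l
      then none else some (c + l.sum) := by
  induction l with
  | nil => intro c s; simp [bLoop, dupLoopA, incrG]
  | cons k rest ih =>
    intro c s
    by_cases h1 : k < 0
    · simp [bLoop, h1]
    · by_cases h2 : k ∈ s
      · simp [bLoop, dupLoopA, h1, h2]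
      · by_cases h3 : m < k
        · simp [bLoop, h1, h2, h3]
        · by_cases h4 : k < c
          · simp [bLoop, incrG, h1, h2, h3, h4]
          · have hstep : bLoop m c s (k :: rest) = bLoop m (c + k) (PySem.Set.add s k) rest := by
              simp [bLoop, h1, h2, h3, h4]
            have hc : ((k :: rest).any (fun k => decide (k < 0)) || dupLoopA s (k :: rest)
                || (k :: rest).any (fun k => decide (m < k)) || incrG c (k :: rest))
              = (rest.any (fun k => decide (k < 0)) || dupLoopA (PySem.Set.add s k) rest
                || rest.any (fun k => decide (m < k)) || incrG (c + k) rest) := by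
              simp [dupLoopA, incrG, h1, h2, h3, h4]
            rw [hstep, ih (c + k) (PySem.Set.add s k), hc]
            have hsum : c + k + rest.sum = c + (k :: rest).sum := by simp; ring
            rw [hsum]

-- A's range/slice form of the increasing check equals incrG 0.
theorem incrA_eq (l : List Int) :
    ((List.range l.length).any (fun i =>
      match PySem.List.pyGet? l (i : Int) with
      | some v => decide (v < (PySem.List.slice l none (some (i : Int))).sum)
      | none => false)) = incrG 0 l := by
  rw [incrG_eq l 0]
  simp [PySem.List.pyGet?_natCast, PySem.List.slice_to_natCast]

-- ===== VERDICT (by name: the statement is the Claim_ definition above) =====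
theorem validatePrivateKey_spec : Claim_equal_validatePrivateKey := by
  intro n m publicKey privateKey _
  unfold Spec_validatePrivateKey validatePrivateKey validatePrivateKey_alt
  simp only [List.map_id']
  rw [bLoop_eq, incrA_eq]
  cases privateKey with
  | nil => simp
  | cons k rest =>
    simp only [List.length_cons, List.isEmpty_cons, beq_iff_eq, Nat.succ_ne_zero, if_false]
    by_cases hneg : (k :: rest).any (fun x => decide (x < 0)) <;>
    by_cases hdup : dupLoopA PySem.Set.empty (k :: rest) <;>
    by_cases hbig : (k :: rest).any (fun x => decide (m < x)) <;>
    by_cases hincr : incrG 0 (k :: rest) <;>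
    by_cases hsum : m ≤ (k :: rest).sum <;>
    by_cases hgcd : (1 : Int) < Int.gcd m n <;>
    simp_all <;>
    first
      | omega
      | (have hA : ¬∃ x ∈ rest, x < 0 := by
           rintro ⟨x, hx, hl⟩; have := hneg.2 x hx; omega
         have hB : ¬∃ x ∈ rest, m < x := by
           rintro ⟨x, hx, hl⟩; have := hbig.2 x hx; omega
         rw [if_neg (by rintro ((h | h) | h | h) <;> first | omega | exact hA h | exact hB h)]
         simp [hA, hB] <;>
         first
           | omega
           | simp [show ¬m ≤ k + rest.sum from by omega, show ¬k < 0 from by omega,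
               show ¬m < k from by omega, show ¬1 < m.gcd n from by omega,
               show k + rest.sum < m from by omega])
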